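-- pv_equiv track=rewrite | github.com/Tamim-saad/kMap-byPython-PersonalWork | kmapMain.py | covered_minterm
-- ===== SOURCE A (Python) =====
-- def permut_size_4(ans):
--     permut_4 = []
--
--     permut_4.append(str(ans[3] + ans[1] + ans[0] + ans[2]))
--     permut_4.append(str(ans[3] + ans[1] + ans[2] + ans[0]))
--     permut_4.append(str(ans[3] + ans[0] + ans[1] + ans[2]))
--     permut_4.append(str(ans[3] + ans[2] + ans[1] + ans[0]))
--     permut_4.append(str(ans[3] + ans[0] + ans[2] + ans[1]))
--     permut_4.append(str(ans[3] + ans[2] + ans[0] + ans[1]))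
--
--     permut_4.append(str(ans[1] + ans[3] + ans[0] + ans[2]))
--     permut_4.append(str(ans[1] + ans[3] + ans[2] + ans[0]))
--     permut_4.append(str(ans[0] + ans[3] + ans[1] + ans[2]))
--     permut_4.append(str(ans[2] + ans[3] + ans[1] + ans[0]))
--     permut_4.append(str(ans[0] + ans[3] + ans[2] + ans[1]))
--     permut_4.append(str(ans[2] + ans[3] + ans[0] + ans[1]))
--
--     permut_4.append(str(ans[1] + ans[0] + ans[3] + ans[2]))
--     permut_4.append(str(ans[1] + ans[2] + ans[3] + ans[0]))
--     permut_4.append(str(ans[0] + ans[1] + ans[3] + ans[2]))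
--     permut_4.append(str(ans[2] + ans[1] + ans[3] + ans[0]))
--     permut_4.append(str(ans[0] + ans[2] + ans[3] + ans[1]))
--     permut_4.append(str(ans[2] + ans[0] + ans[3] + ans[1]))
--
--     permut_4.append(str(ans[1] + ans[0] + ans[2] + ans[3]))
--     permut_4.append(str(ans[1] + ans[2] + ans[0] + ans[3]))
--     permut_4.append(str(ans[0] + ans[1] + ans[2] + ans[3]))
--     permut_4.append(str(ans[2] + ans[1] + ans[0] + ans[3]))
--     permut_4.append(str(ans[0] + ans[2] + ans[1] + ans[3]))
--     permut_4.append(str(ans[2] + ans[0] + ans[1] + ans[3]))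
--     return permut_4
--
-- def covered_minterm(check):
--     len4 = ["abcd", "abcD", "abCd", "abCD", "aBcd", "aBcD", "aBCd", "aBCD",
--             "Abcd", "AbcD", "AbCd", "AbCD", "ABcd", "ABcD", "ABCd", "ABCD"]
--     covered = []
--     i = 0
--     while i < 16:
--         all_list = permut_size_4(len4[i])
--         check_bool = False
--
--         j = 0
--         while j < len(all_list):
--             if (check in all_list[j]) == True: check_bool = True
--             j += 1
--
--         if (check_bool == True):
--             covered.append(1)
--         else:
--             covered.append(0)
--         i += 1
--
--     return covered
-- ===== SOURCE B (Python) =====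
-- def covered_minterm(check):
--     len4 = ["abcd", "abcD", "abCd", "abCD", "aBcd", "aBcD", "aBCd", "aBCD",
--             "Abcd", "AbcD", "AbCd", "AbCD", "ABcd", "ABcD", "ABCd", "ABCD"]
--     s = set(check)
--     if len(s) != len(check):
--         return [0] * 16
--     return [1 if s <= set(m) else 0 for m in len4]
-- ===== Notes on version B (the rewrite author's own statement) =====
-- stated objective: simpler
-- what changed: A tests check as a substring of each of 24 hand-listed permutations of every minterm; B replaces that scan by one direct set test per minterm (chars of check pairwise distinct and contained in the minterm's character set).
import Mathlib
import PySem

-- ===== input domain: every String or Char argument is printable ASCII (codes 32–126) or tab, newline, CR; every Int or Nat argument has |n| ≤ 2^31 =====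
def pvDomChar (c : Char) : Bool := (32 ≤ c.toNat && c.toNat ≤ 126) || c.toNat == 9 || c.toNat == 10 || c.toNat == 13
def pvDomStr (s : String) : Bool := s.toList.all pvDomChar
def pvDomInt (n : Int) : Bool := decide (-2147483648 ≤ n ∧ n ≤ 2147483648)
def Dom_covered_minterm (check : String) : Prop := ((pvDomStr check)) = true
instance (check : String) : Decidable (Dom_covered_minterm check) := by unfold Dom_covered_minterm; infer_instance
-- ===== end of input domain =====

-- B replaces A's 24-permutation substring scan per minterm by a direct set test
-- (chars of check distinct and contained in the minterm); simpler, same results.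

-- ===== PORT A =====
-- Strings are handled on the List Char side (PySem convention). permut_size_4 is
-- only ever called on the 4-char minterm literals, where every ans[i] is defined;
-- the .getD [] default is unreachable on those calls.
def permut_size_4 (ans : String) : List (List Char) :=
  let a := ans.toList
  let g : Int → List Char := fun i => ((PySem.List.pyGet? a i).map (fun c => [c])).getD []
  [ g 3 ++ g 1 ++ g 0 ++ g 2, g 3 ++ g 1 ++ g 2 ++ g 0, g 3 ++ g 0 ++ g 1 ++ g 2,
    g 3 ++ g 2 ++ g 1 ++ g 0, g 3 ++ g 0 ++ g 2 ++ g 1, g 3 ++ g 2 ++ g 0 ++ g 1,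
    g 1 ++ g 3 ++ g 0 ++ g 2, g 1 ++ g 3 ++ g 2 ++ g 0, g 0 ++ g 3 ++ g 1 ++ g 2,
    g 2 ++ g 3 ++ g 1 ++ g 0, g 0 ++ g 3 ++ g 2 ++ g 1, g 2 ++ g 3 ++ g 0 ++ g 1,
    g 1 ++ g 0 ++ g 3 ++ g 2, g 1 ++ g 2 ++ g 3 ++ g 0, g 0 ++ g 1 ++ g 3 ++ g 2,
    g 2 ++ g 1 ++ g 3 ++ g 0, g 0 ++ g 2 ++ g 3 ++ g 1, g 2 ++ g 0 ++ g 3 ++ g 1,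
    g 1 ++ g 0 ++ g 2 ++ g 3, g 1 ++ g 2 ++ g 0 ++ g 3, g 0 ++ g 1 ++ g 2 ++ g 3,
    g 2 ++ g 1 ++ g 0 ++ g 3, g 0 ++ g 2 ++ g 1 ++ g 3, g 2 ++ g 0 ++ g 1 ++ g 3 ]

def covered_minterm (check : String) : List Int :=
  let len4 : List String := ["abcd", "abcD", "abCd", "abCD", "aBcd", "aBcD", "aBCd", "aBCD",
                             "Abcd", "AbcD", "AbCd", "AbCD", "ABcd", "ABcD", "ABCd", "ABCD"]
  -- while i < 16 over len4; 'check in all_list[j]' sets check_bool; append 1/0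
  len4.foldl (fun covered m =>
    let all_list := permut_size_4 m
    let check_bool := all_list.foldl
      (fun b s => if PySem.Chars.isIn check.toList s = true then true else b) false
    covered ++ [if check_bool = true then (1 : Int) else 0]) []

-- ===== PORT B =====
def covered_minterm_alt (check : String) : List Int :=
  let len4 : List String := ["abcd", "abcD", "abCd", "abCD", "aBcd", "aBcD", "aBCd", "aBCD",
                             "Abcd", "AbcD", "AbCd", "AbCD", "ABcd", "ABcD", "ABCd", "ABCD"]
  let s : PySem.Set Char := PySem.Set.ofList check.toList
  if PySem.Set.len s ≠ PySem.Str.len check then List.replicate 16 0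
  else len4.map (fun m =>
    if PySem.Set.issubset s (PySem.Set.ofList m.toList) = true then (1 : Int) else 0)

-- ===== PRECONDITION & SPEC =====
def Spec_covered_minterm (check : String) (out : List Int) : Prop := out = covered_minterm_alt check
instance (check : String) (out : List Int) : Decidable (Spec_covered_minterm check out) := by unfold Spec_covered_minterm; infer_instance

-- ===== CLAIM (what is proved, stated in full; the proofs are below) =====
def Claim_equal_covered_minterm : Prop := ∀ (check : String), Dom_covered_minterm check → Spec_covered_minterm check (covered_minterm check)

-- ===== LEMMAS AND PROOFS =====

-- The 24 orderings permut_size_4 produces from a 4-char string [w,x,y,z], in order.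
def perms24 (w x y z : Char) : List (List Char) :=
  [ [z,x,w,y], [z,x,y,w], [z,w,x,y], [z,y,x,w], [z,w,y,x], [z,y,w,x],
    [x,z,w,y], [x,z,y,w], [w,z,x,y], [y,z,x,w], [w,z,y,x], [y,z,w,x],
    [x,w,z,y], [x,y,z,w], [w,x,z,y], [y,x,z,w], [w,y,z,x], [y,w,z,x],
    [x,w,y,z], [x,y,w,z], [w,x,y,z], [y,x,w,z], [w,y,x,z], [y,w,x,z] ]

lemma permut_size_4_eq (m : String) (w x y z : Char) (hm : m.toList = [w, x, y, z]) :
    permut_size_4 m = perms24 w x y z := by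
  simp [permut_size_4, hm, PySem.List.pyGet?, PySem.List.pyIdx?, perms24]

lemma mem_perms24_iff (w x y z : Char) (q : List Char) :
    q ∈ perms24 w x y z ↔ List.Perm q [w, x, y, z] := by
  rw [← List.mem_permutations']
  simp [perms24, List.permutations', List.permutations'Aux]
  tauto

-- check is an infix of one of the 24 permutations iff its chars are distinct and all lie in [w,x,y,z]
lemma cover_iff (w x y z : Char) (hd : ([w, x, y, z] : List Char).Nodup) (c : List Char) :
    (∃ p ∈ perms24 w x y z, c <:+: p) ↔ (c.Nodup ∧ c ⊆ [w, x, y, z]) := by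
  constructor
  · rintro ⟨p, hp, hinf⟩
    have hperm : List.Perm p [w, x, y, z] := (mem_perms24_iff w x y z p).mp hp
    have hpn : p.Nodup := hperm.nodup_iff.mpr hd
    have hsub : c.Sublist p := hinf.sublist
    exact ⟨hsub.nodup hpn, fun a ha => hperm.mem_iff.mp (hsub.subset ha)⟩
  · rintro ⟨hn, hs⟩
    obtain ⟨n, hnp, hns⟩ := List.subperm_of_subset hn hs
    obtain ⟨r, hr⟩ := hns.exists_perm_append
    refine ⟨c ++ r, ?_, (List.prefix_append c r).isInfix⟩
    exact (mem_perms24_iff w x y z _).mpr ((hnp.append_right r).symm.trans hr.symm)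

lemma foldl_or (c : List Char) (L : List (List Char)) (b : Bool) :
    L.foldl (fun b s => if PySem.Chars.isIn c s = true then true else b) b
      = (b || L.any fun s => PySem.Chars.isIn c s) := by
  induction L generalizing b with
  | nil => simp
  | cons h t ih =>
    simp only [List.foldl_cons, List.any_cons, ih]
    by_cases hh : PySem.Chars.isIn c h = true <;> simp [hh]

lemma ofList_sublist {α : Type} [BEq α] [LawfulBEq α] (c : List α) :
    (PySem.Set.ofList c).Sublist c := by
  induction c using List.reverseRecOn with
  | nil => simp [PySem.Set.ofList_nil]
  | append_singleton xs x ih =>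
    rw [PySem.Set.ofList_append_singleton, PySem.Set.add_eq_ite]
    split
    · exact ih.trans (List.sublist_append_left xs [x])
    · exact ih.append (List.Sublist.refl [x])

lemma len_ofList_eq_iff_nodup (c : List Char) :
    (PySem.Set.ofList c).length = c.length ↔ c.Nodup := by
  constructor
  · intro h
    have := (ofList_sublist c).eq_of_length h
    rw [← this]; exact PySem.Set.nodup_ofList c
  · intro h; rw [PySem.Set.ofList_eq_self_of_nodup c h]

-- one minterm's entry: A's permutation scan equals B's set test
lemma entry_eq (m : String) (w x y z : Char) (hm : m.toList = [w, x, y, z])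
    (hd : ([w, x, y, z] : List Char).Nodup) (c : List Char) :
    (if (permut_size_4 m).foldl
        (fun b s => if PySem.Chars.isIn c s = true then true else b) false = true
      then (1 : Int) else 0)
    = (if c.Nodup ∧ PySem.Set.issubset (PySem.Set.ofList c) (PySem.Set.ofList m.toList) = true
      then (1 : Int) else 0) := by
  rw [permut_size_4_eq m w x y z hm, foldl_or, Bool.false_or]
  refine if_congr ?_ rfl rfl
  rw [List.any_eq_true]
  constructor
  · rintro ⟨p, hp, hin⟩
    have hinf := (PySem.Chars.isIn_iff_infix c p).mp hin
    have h := (cover_iff w x y z hd c).mp ⟨p, hp, hinf⟩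
    refine ⟨h.1, ?_⟩
    rw [PySem.Set.issubset_iff]
    intro a ha
    rw [PySem.Set.mem_ofList] at ha ⊢
    rw [hm]; exact h.2 ha
  · rintro ⟨hn, hs⟩
    rw [PySem.Set.issubset_iff] at hs
    have hsub : c ⊆ [w, x, y, z] := by
      intro a ha
      have := hs a ((PySem.Set.mem_ofList c a).mpr ha)
      rw [PySem.Set.mem_ofList, hm] at this; exact this
    obtain ⟨p, hp, hinf⟩ := (cover_iff w x y z hd c).mpr ⟨hn, hsub⟩
    exact ⟨p, hp, (PySem.Chars.isIn_iff_infix c p).mpr hinf⟩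

-- ===== VERDICT (by name: the statement is the Claim_ definition above) =====
theorem covered_minterm_spec : Claim_equal_covered_minterm := by
  intro check _
  unfold Spec_covered_minterm
  set c := check.toList with hc
  show covered_minterm check = covered_minterm_alt check
  simp only [covered_minterm, covered_minterm_alt, List.foldl_cons, List.foldl_nil,
    List.nil_append, List.append_assoc, List.singleton_append, List.map_cons, List.map_nil, ← hc]
  rw [entry_eq "abcd" 'a' 'b' 'c' 'd' (by decide) (by decide) c,
      entry_eq "abcD" 'a' 'b' 'c' 'D' (by decide) (by decide) c,
      entry_eq "abCd" 'a' 'b' 'C' 'd' (by decide) (by decide) c,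
      entry_eq "abCD" 'a' 'b' 'C' 'D' (by decide) (by decide) c,
      entry_eq "aBcd" 'a' 'B' 'c' 'd' (by decide) (by decide) c,
      entry_eq "aBcD" 'a' 'B' 'c' 'D' (by decide) (by decide) c,
      entry_eq "aBCd" 'a' 'B' 'C' 'd' (by decide) (by decide) c,
      entry_eq "aBCD" 'a' 'B' 'C' 'D' (by decide) (by decide) c,
      entry_eq "Abcd" 'A' 'b' 'c' 'd' (by decide) (by decide) c,
      entry_eq "AbcD" 'A' 'b' 'c' 'D' (by decide) (by decide) c,
      entry_eq "AbCd" 'A' 'b' 'C' 'd' (by decide) (by decide) c,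
      entry_eq "AbCD" 'A' 'b' 'C' 'D' (by decide) (by decide) c,
      entry_eq "ABcd" 'A' 'B' 'c' 'd' (by decide) (by decide) c,
      entry_eq "ABcD" 'A' 'B' 'c' 'D' (by decide) (by decide) c,
      entry_eq "ABCd" 'A' 'B' 'C' 'd' (by decide) (by decide) c,
      entry_eq "ABCD" 'A' 'B' 'C' 'D' (by decide) (by decide) c]
  by_cases hnd : c.Nodup
  · have hlen : ¬ (PySem.Set.len (PySem.Set.ofList c) ≠ PySem.Str.len check) := by
      simp [PySem.Set.len, PySem.Str.len_eq, ← hc,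
        (len_ofList_eq_iff_nodup c).mpr hnd]
    rw [if_neg hlen]
    simp only [eq_true hnd, true_and, List.cons_append, List.nil_append]
  · have hlen : PySem.Set.len (PySem.Set.ofList c) ≠ PySem.Str.len check := by
      simp only [PySem.Set.len, PySem.Str.len_eq, ← hc, ne_eq,
        Nat.cast_inj]
      intro h; exact hnd ((len_ofList_eq_iff_nodup c).mp h)
    rw [if_pos hlen]
    simp only [eq_false hnd, false_and, if_false, List.cons_append, List.nil_append]
    rfl
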